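-- pv_equiv track=rewrite | github.com/Rodeet/sapr | task2/task.py | count_indirect_children
-- ===== SOURCE A (Python) =====
-- def count_indirect_children(adj, obj):
--     direct_children = []
--     counter = 0
--     for a in adj:
--         if a[0] == obj:
--             direct_children.append(a[1])
--     for direct_child in direct_children:
--         next_children = [direct_child]
--         while True:
--             new_next_children = []
--             for a in adj:
--                 if a[0] in next_children:
--                     counter += 1
--                     new_next_children.append(a[1])
--             if len(new_next_children) == 0:
--                 break
--             next_children = new_next_children
--     return counter
-- ===== SOURCE B (Python) =====
-- def count_indirect_children(adj, obj):
--     children = {}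
--     for s, t in adj:
--         children.setdefault(s, []).append(t)
--     total = 0
--     for child in children.get(obj, []):
--         frontier = {child}
--         while True:
--             gained = 0
--             for v in frontier:
--                 gained += len(children.get(v, ()))
--             if gained == 0:
--                 break
--             nxt = set()
--             for v in frontier:
--                 nxt.update(children.get(v, ()))
--             total += gained
--             frontier = nxt
--     return total
-- ===== Notes on version B (the rewrite author's own statement) =====
-- stated objective: faster
-- what changed: Instead of rescanning the whole edge list once per level per direct child with a list membership test inside, B builds a source->targets adjacency dict once and walks levels with a duplicate-free set frontier, adding the out-degrees of the frontier's own nodes.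
import Mathlib
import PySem

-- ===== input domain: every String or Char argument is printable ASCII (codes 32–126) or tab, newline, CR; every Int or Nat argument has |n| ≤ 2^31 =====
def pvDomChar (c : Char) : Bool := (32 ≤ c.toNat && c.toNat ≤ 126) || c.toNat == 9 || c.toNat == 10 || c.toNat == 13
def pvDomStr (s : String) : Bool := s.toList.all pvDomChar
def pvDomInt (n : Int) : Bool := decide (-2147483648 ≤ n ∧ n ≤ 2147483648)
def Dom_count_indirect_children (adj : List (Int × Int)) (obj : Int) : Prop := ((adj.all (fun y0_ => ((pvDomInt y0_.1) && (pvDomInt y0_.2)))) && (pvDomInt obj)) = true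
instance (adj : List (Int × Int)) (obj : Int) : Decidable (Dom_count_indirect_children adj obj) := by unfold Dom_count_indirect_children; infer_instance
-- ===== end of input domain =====

-- B replaces A's repeated whole-edge-list scans (one scan per level per direct child, with a
-- list membership test inside) by an adjacency dict built once and a set-frontier level walk
-- that only touches the frontier's own out-edges; same return value wherever A terminates
-- (on inputs with a cycle reachable from obj both Pythons loop forever alike).

-- ===== PORT A =====
-- direct_children: A's first loop, appending a[1] whenever a[0] == obj
def aDirect (adj : List (Int × Int)) (obj : Int) : List Int :=
  adj.foldl (fun acc a => if a.1 == obj then acc ++ [a.2] else acc) []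

-- one pass of A's inner 'for a in adj' body: threads (counter, new_next_children)
def aPass (adj : List (Int × Int)) (next : List Int) (counter : Int) : Int × List Int :=
  adj.foldl (fun p a => if next.contains a.1 then (p.1 + 1, p.2 ++ [a.2]) else p) (counter, [])

-- A's 'while True' loop. The Python loop terminates exactly when no cycle is reachable from
-- obj; there every nonempty level ends a repetition-free path whose tail consists of distinct
-- edge targets, so at most adj.length + 1 levels are nonempty and fuel adj.length + 2 lets
-- the loop break on its own before the fuel runs out. On a reachable cycle both Pythons
-- loop forever and both fueled ports return the (equal) count accumulated so far.
def aWhile (adj : List (Int × Int)) : Nat → List Int → Int → Int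
  | 0, _, counter => counter
  | fuel+1, next, counter =>
    if (aPass adj next counter).2.length == 0 then (aPass adj next counter).1
    else aWhile adj fuel (aPass adj next counter).2 (aPass adj next counter).1

def count_indirect_children (adj : List (Int × Int)) (obj : Int) : Int :=
  (aDirect adj obj).foldl (fun counter dc => aWhile adj (adj.length + 2) [dc] counter) 0

-- ===== PORT B =====
-- children.setdefault(s, []).append(t) loop: group targets by source, insertion order
def bChildren (adj : List (Int × Int)) : PySem.Dict Int (List Int) :=
  adj.foldl (fun d p => d.modify p.1 [] (fun l => l ++ [p.2])) PySem.Dict.empty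

-- B's 'while True' per-child loop over a set frontier; same fuel bound as A's port
def bLevel (children : PySem.Dict Int (List Int)) : Nat → PySem.Set Int → Int → Int
  | 0, _, total => total
  | fuel+1, frontier, total =>
    if frontier.foldl (fun g v => g + ((children.getD v []).length : Int)) 0 == 0 then total
    else bLevel children fuel
      (frontier.foldl (fun s v => PySem.Set.update s (children.getD v [])) PySem.Set.empty)
      (total + frontier.foldl (fun g v => g + ((children.getD v []).length : Int)) 0)

def count_indirect_children_alt (adj : List (Int × Int)) (obj : Int) : Int :=
  ((bChildren adj).getD obj []).foldl
    (fun total child => bLevel (bChildren adj) (adj.length + 2) (PySem.Set.ofList [child]) total) 0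

-- ===== PRECONDITION & SPEC =====
def Spec_count_indirect_children (adj : List (Int × Int)) (obj : Int) (out : Int) : Prop := out = count_indirect_children_alt adj obj
instance (adj : List (Int × Int)) (obj : Int) (out : Int) : Decidable (Spec_count_indirect_children adj obj out) := by unfold Spec_count_indirect_children; infer_instance

-- ===== CLAIM (what is proved, stated in full; the proofs are below) =====
def Claim_equal_count_indirect_children : Prop := ∀ (adj : List (Int × Int)) (obj : Int), Dom_count_indirect_children adj obj → Spec_count_indirect_children adj obj (count_indirect_children adj obj)

-- ===== LEMMAS AND PROOFS =====

theorem aDirect_eq (adj : List (Int × Int)) (obj : Int) :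
    aDirect adj obj = (adj.filter (fun p => p.1 == obj)).map (fun p => p.2) := by
  unfold aDirect; rw [PySem.List.foldl_append_if]; rfl

theorem bChildren_getD (adj : List (Int × Int)) (k : Int) :
    (bChildren adj).getD k [] = (adj.filter (fun p => p.1 == k)).map (fun p => p.2) := by
  unfold bChildren
  rw [PySem.Dict.getD_foldl_modify_append]
  simp

-- characterisation of one pass of A's inner loop
theorem aPass_eq (adj : List (Int × Int)) (next : List Int) (c : Int) :
    aPass adj next c =
      (c + (((adj.filter (fun a => next.contains a.1)).length : Nat) : Int),
       (adj.filter (fun a => next.contains a.1)).map (fun a => a.2)) := by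
  unfold aPass
  suffices h : ∀ (l : List (Int × Int)) (c : Int) (acc : List Int),
      l.foldl (fun p a => if next.contains a.1 then (p.1 + 1, p.2 ++ [a.2]) else p) (c, acc) =
        (c + (((l.filter (fun a => next.contains a.1)).length : Nat) : Int),
         acc ++ (l.filter (fun a => next.contains a.1)).map (fun a => a.2)) by
    simpa using h adj c []
  intro l
  induction l with
  | nil => intro c acc; simp
  | cons a l ih =>
    intro c acc
    rw [List.foldl_cons, List.filter_cons]
    by_cases h : next.contains a.1
    · rw [if_pos h, if_pos h, ih]
      simp only [Prod.mk.injEq, List.length_cons, List.map_cons, List.append_assoc,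
        List.singleton_append]
      exact ⟨by push_cast; ring, trivial⟩
    · rw [if_neg h, if_neg h, ih]

-- Σ_{v ∈ S} [x = v] = [x ∈ S] for a Nodup S
theorem sum_indicator_nodup (S : List Int) (x : Int) (h : S.Nodup) :
    (S.map (fun v => if x = v then (1 : Int) else 0)).sum = (if x ∈ S then (1 : Int) else 0) := by
  induction S with
  | nil => simp
  | cons v S ih =>
    simp only [List.nodup_cons] at h
    by_cases hxv : x = v
    · subst hxv
      simp [ih h.2, h.1]
    · simp [hxv, ih h.2]

-- summing per-source out-degrees over a Nodup frontier counts all edges from the frontier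
theorem sum_countP_nodup (adj : List (Int × Int)) (S : List Int) (h : S.Nodup) :
    (S.map (fun v => ((adj.countP (fun p => p.1 == v) : Nat) : Int))).sum =
      ((adj.countP (fun a => decide (a.1 ∈ S)) : Nat) : Int) := by
  induction adj with
  | nil => simp
  | cons a adj ih =>
    have hfun : (fun v : Int => (((a :: adj).countP (fun p => p.1 == v) : Nat) : Int)) =
        (fun v : Int => ((adj.countP (fun p => p.1 == v) : Nat) : Int) + (if a.1 = v then (1 : Int) else 0)) := by
      funext v
      rw [List.countP_cons]
      by_cases hv : a.1 = v <;> simp [hv]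
    rw [hfun, PySem.List.sum_map_add_int, ih, sum_indicator_nodup S a.1 h, List.countP_cons]
    by_cases hm : a.1 ∈ S <;> simp [hm]

-- membership in B's next-frontier fold
theorem mem_foldl_update (g : Int → List Int) (S : List Int) (s0 : List Int) (y : Int) :
    (y ∈ S.foldl (fun s v => PySem.Set.update s (g v)) s0) ↔ (y ∈ s0 ∨ ∃ v ∈ S, y ∈ g v) := by
  induction S generalizing s0 with
  | nil => simp
  | cons v S ih =>
    simp only [List.foldl_cons, ih, PySem.Set.mem_update]
    constructor
    · rintro (⟨h | h⟩ | ⟨w, hw, hy⟩)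
      · exact Or.inl h
      · exact Or.inr ⟨v, by simp, h⟩
      · exact Or.inr ⟨w, by simp [hw], hy⟩
    · rintro (h | ⟨w, hw, hy⟩)
      · exact Or.inl (Or.inl h)
      · rcases List.mem_cons.mp hw with rfl | hw
        · exact Or.inl (Or.inr hy)
        · exact Or.inr ⟨w, hw, hy⟩

theorem nodup_foldl_update (g : Int → List Int) (S : List Int) (s0 : List Int) (h : s0.Nodup) :
    (S.foldl (fun s v => PySem.Set.update s (g v)) s0).Nodup := by
  induction S generalizing s0 with
  | nil => exact h
  | cons v S ih => exact ih _ (PySem.Set.nodup_update _ _ h)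

-- the two while-loops agree level by level: list frontier of A vs set frontier of B
theorem loop_eq (adj : List (Int × Int)) (fuel : Nat) :
    ∀ (next S : List Int) (c : Int), S.Nodup → (∀ x, x ∈ next ↔ x ∈ S) →
      aWhile adj fuel next c = bLevel (bChildren adj) fuel S c := by
  induction fuel with
  | zero => intro next S c _ _; rfl
  | succ fuel ih =>
    intro next S c hnd hmem
    have hcont : (fun a : Int × Int => next.contains a.1) = (fun a : Int × Int => decide (a.1 ∈ S)) := by
      funext a
      rw [List.contains_eq_mem]
      simp [hmem]
    have hgained : S.foldl (fun g v => g + (((bChildren adj).getD v []).length : Int)) 0 =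
        (((adj.filter (fun a : Int × Int => decide (a.1 ∈ S))).length : Nat) : Int) := by
      rw [PySem.List.foldl_add]
      have hfun : (fun v : Int => (((bChildren adj).getD v []).length : Int)) =
          (fun v : Int => ((adj.countP (fun p => p.1 == v) : Nat) : Int)) := by
        funext v
        rw [bChildren_getD]
        simp [List.countP_eq_length_filter]
      rw [hfun, sum_countP_nodup adj S hnd]
      simp [List.countP_eq_length_filter]
    have hmap : aWhile adj (fuel+1) next c =
        if ((adj.filter (fun a : Int × Int => decide (a.1 ∈ S))).length == 0) = true
        then c + (((adj.filter (fun a : Int × Int => decide (a.1 ∈ S))).length : Nat) : Int)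
        else aWhile adj fuel ((adj.filter (fun a : Int × Int => decide (a.1 ∈ S))).map (fun a => a.2))
          (c + (((adj.filter (fun a : Int × Int => decide (a.1 ∈ S))).length : Nat) : Int)) := by
      simp only [aWhile, aPass_eq, List.length_map, hcont]
    rw [hmap]
    simp only [bLevel, hgained]
    by_cases hnil : adj.filter (fun a : Int × Int => decide (a.1 ∈ S)) = []
    · simp [hnil]
    · have hlen : (adj.filter (fun a : Int × Int => decide (a.1 ∈ S))).length ≠ 0 := by
        simpa [List.length_eq_zero_iff] using hnil
      have hA : ((adj.filter (fun a : Int × Int => decide (a.1 ∈ S))).length == 0) = false := by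
        simpa using hlen
      have hB : ((((adj.filter (fun a : Int × Int => decide (a.1 ∈ S))).length : Nat) : Int) == 0) = false := by
        simpa using hlen
      rw [hA, hB]
      simp only [Bool.false_eq_true, if_false]
      apply ih
      · exact nodup_foldl_update _ _ _ List.nodup_nil
      · intro x
        rw [mem_foldl_update]
        constructor
        · intro hx
          simp only [List.mem_map, List.mem_filter, decide_eq_true_eq] at hx
          rcases hx with ⟨a, ⟨ha, hain⟩, rfl⟩
          refine Or.inr ⟨a.1, hain, ?_⟩
          rw [bChildren_getD]
          simp only [List.mem_map, List.mem_filter]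
          exact ⟨a, ⟨ha, by simp⟩, rfl⟩
        · rintro (h | ⟨v, hv, hx⟩)
          · simp at h
          · rw [bChildren_getD] at hx
            simp only [List.mem_map, List.mem_filter, decide_eq_true_eq] at hx ⊢
            rcases hx with ⟨a, ⟨ha, hav⟩, rfl⟩
            exact ⟨a, ⟨ha, by simpa [(by simpa using hav : a.1 = v)] using hv⟩, rfl⟩

-- ===== VERDICT (by name: the statement is the Claim_ definition above) =====
theorem count_indirect_children_spec : Claim_equal_count_indirect_children := by
  intro adj obj _
  show count_indirect_children adj obj = count_indirect_children_alt adj obj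
  unfold count_indirect_children count_indirect_children_alt
  rw [aDirect_eq, bChildren_getD]
  apply PySem.List.foldl_congr_mem
  intro c dc _
  apply loop_eq
  · exact List.nodup_singleton dc
  · intro x
    simp [PySem.Set.mem_ofList]
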